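-- pv_equiv track=rewrite | github.com/wolffdeveloper1232/ProtonLang-compiler | cool-compiler.py | count_nostr
-- ===== SOURCE A (Python) =====
-- def count_nostr(string, thing):
--         instring = False
--
--         out = 0
--
--         for i in range(len(string)):
--             if string[i:i+len(thing)] == '"':
--                 instring = not instring
--
--             if instring:
--                 continue
--
--             if string[i:i+len(thing)] == thing:
--                 out += 1
--
--         return out
-- ===== SOURCE B (Python) =====
-- def count_nostr(string, thing):
--     n = len(string)
--     k = len(thing)
--     # pass 1: build the post-toggle in-string mask
--     mask = []
--     flag = False
--     for i in range(n):
--         if string[i:i+k] == '"':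
--             flag = not flag
--         mask.append(flag)
--     # pass 2: count matches at indices outside strings
--     return sum(1 for i, m in zip(range(n), mask)
--                if not m and string[i:i+k] == thing)
-- ===== Notes on version B (the rewrite author's own statement) =====
-- stated objective: alternative
-- what changed: Replaces A's single fused loop carrying (instring, out) state by a two-pass decomposition: a first pass materialises the post-toggle in-string mask as a list, and a second pass counts matches over zip(range(n), mask).
import Mathlib
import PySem

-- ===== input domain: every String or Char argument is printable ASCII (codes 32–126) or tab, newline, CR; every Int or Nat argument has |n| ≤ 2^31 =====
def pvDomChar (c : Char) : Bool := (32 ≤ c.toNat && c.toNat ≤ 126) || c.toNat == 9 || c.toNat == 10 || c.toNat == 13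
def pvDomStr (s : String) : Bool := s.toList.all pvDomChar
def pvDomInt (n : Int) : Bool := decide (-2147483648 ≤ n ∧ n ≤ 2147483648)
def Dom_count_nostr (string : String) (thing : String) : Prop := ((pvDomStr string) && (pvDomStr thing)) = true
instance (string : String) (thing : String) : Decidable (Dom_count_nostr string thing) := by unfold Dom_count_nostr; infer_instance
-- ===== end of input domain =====

-- B replaces A's fused stateful loop by a two-pass decomposition (mask list, then count); objective: alternative, same cost.

-- ===== PORT A =====
-- one iteration of A's loop body over state (instring, out)
def countNostrStep (s t : List Char) (st : Bool × Int) (i : Int) : Bool × Int :=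
  let instring := if PySem.List.slice s (some i) (some (i + (t.length : Int))) = ['"'] then !st.1 else st.1
  if instring then (instring, st.2)
  else if PySem.List.slice s (some i) (some (i + (t.length : Int))) = t then (instring, st.2 + 1)
  else (instring, st.2)

def count_nostr (string : String) (thing : String) : Int :=
  let s := string.toList
  let t := thing.toList
  ((PySem.List.pyRange 0 (s.length : Int) 1).foldl (countNostrStep s t) (false, 0)).2

-- ===== PORT B =====
-- pass 1: the post-toggle in-string mask, one Bool per index
def countNostrMask (s t : List Char) (idxs : List Int) (flag : Bool) : List Bool :=
  match idxs with
  | [] => []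
  | i :: rest =>
    let f := if PySem.List.slice s (some i) (some (i + (t.length : Int))) = ['"'] then !flag else flag
    f :: countNostrMask s t rest f

def count_nostr_alt (string : String) (thing : String) : Int :=
  let s := string.toList
  let t := thing.toList
  let idxs := PySem.List.pyRange 0 (s.length : Int) 1
  let mask := countNostrMask s t idxs false
  -- pass 2: count matches at indices whose mask is false
  (idxs.zip mask).foldl
    (fun (acc : Int) (p : Int × Bool) =>
      if !p.2 && decide (PySem.List.slice s (some p.1) (some (p.1 + (t.length : Int))) = t)
      then acc + 1 else acc) 0

-- ===== PRECONDITION & SPEC =====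
def Spec_count_nostr (string : String) (thing : String) (out : Int) : Prop := out = count_nostr_alt string thing
instance (string : String) (thing : String) (out : Int) : Decidable (Spec_count_nostr string thing out) := by unfold Spec_count_nostr; infer_instance

-- ===== CLAIM (what is proved, stated in full; the proofs are below) =====
def Claim_equal_count_nostr : Prop := ∀ (string : String) (thing : String), Dom_count_nostr string thing → Spec_count_nostr string thing (count_nostr string thing)

-- ===== LEMMAS AND PROOFS =====

-- the fused loop equals: count over the zip of the indices with the mask built from the same flag
theorem countNostr_key (s t : List Char) (idxs : List Int) (f : Bool) (o : Int) :
    (idxs.foldl (countNostrStep s t) (f, o)).2 =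
      (idxs.zip (countNostrMask s t idxs f)).foldl
        (fun (acc : Int) (p : Int × Bool) =>
          if !p.2 && decide (PySem.List.slice s (some p.1) (some (p.1 + (t.length : Int))) = t)
          then acc + 1 else acc) o := by
  induction idxs generalizing f o with
  | nil => rfl
  | cons i rest ih =>
    by_cases ht : t = ['"']
    · subst ht
      by_cases hq : PySem.List.slice s (some i) (some (i + (1 : Int))) = ['"'] <;>
        cases f <;>
        simp [List.foldl, countNostrMask, countNostrStep, hq, ih]
    · by_cases hq : PySem.List.slice s (some i) (some (i + (t.length : Int))) = ['"'] <;>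
        cases f <;>
        by_cases hm : PySem.List.slice s (some i) (some (i + (t.length : Int))) = t <;>
        simp [List.foldl, countNostrMask, countNostrStep, hq, hm, ht, Ne.symm ht, ih]

-- ===== VERDICT (by name: the statement is the Claim_ definition above) =====
theorem count_nostr_spec : Claim_equal_count_nostr := by
  intro string thing _
  unfold Spec_count_nostr count_nostr count_nostr_alt
  exact countNostr_key _ _ _ false 0
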